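-- pv_equiv track=rewrite | github.com/agarwalmaanvik/NEXUS | range_encoder.py | _class_decompose
-- ===== SOURCE A (Python) =====
-- def _class_decompose(cls_idx: int) -> tuple[int, int, bool]:
--     """Returns (rank1, rank2, suited) for a class index 0-168."""
--     if cls_idx < 13:          # Pairs: AA=0, KK=1, ..., 22=12
--         r = 12 - cls_idx
--         return r, r, False
--     elif cls_idx < 91:        # Suited: AKs=13 ... 32s=90
--         idx = cls_idx - 13
--         # Enumerate: AKs, AQs, ..., A2s (12 combos), KQs, ..., K2s (11), ...
--         r1 = 12
--         while idx >= r1: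
--             idx -= r1
--             r1 -= 1
--         r2 = r1 - 1 - idx
--         return r1, r2, True
--     else:                     # Offsuit: AKo=91 ... 32o=168
--         idx = cls_idx - 91
--         r1 = 12
--         while idx >= r1:
--             idx -= r1
--             r1 -= 1
--         r2 = r1 - 1 - idx
--         return r1, r2, False
-- ===== SOURCE B (Python) =====
-- # Precompute the 78 (r1, r2) rank pairs once in enumeration order; both non-pair
-- # branches become a single table lookup.
-- _PAIRS = [(r1, r2) for r1 in range(12, 0, -1) for r2 in range(r1 - 1, -1, -1)]
--
-- def _class_decompose(cls_idx: int) -> tuple[int, int, bool]: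
--     if cls_idx < 13:
--         r = 12 - cls_idx
--         return r, r, False
--     suited = cls_idx < 91
--     r1, r2 = _PAIRS[cls_idx - 13 if suited else cls_idx - 91]
--     return r1, r2, suited
-- ===== Notes on version B (the rewrite author's own statement) =====
-- stated objective: alternative
-- what changed: The suited/offsuit triangular while-loop is replaced by indexing into the 78-entry (r1, r2) pair table built once by a comprehension; the pair branch is unchanged.
import Mathlib
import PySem

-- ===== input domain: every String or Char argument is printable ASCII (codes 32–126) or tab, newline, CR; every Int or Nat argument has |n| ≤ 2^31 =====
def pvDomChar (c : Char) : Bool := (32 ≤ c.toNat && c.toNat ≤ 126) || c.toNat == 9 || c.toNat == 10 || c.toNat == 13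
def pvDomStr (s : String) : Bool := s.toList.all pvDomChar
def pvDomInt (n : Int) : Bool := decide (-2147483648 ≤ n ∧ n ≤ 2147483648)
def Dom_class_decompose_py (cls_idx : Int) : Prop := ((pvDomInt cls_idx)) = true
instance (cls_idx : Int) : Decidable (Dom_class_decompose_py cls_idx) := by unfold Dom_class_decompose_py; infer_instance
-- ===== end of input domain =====

-- B replaces A's triangular while-loop with a table of the 78 rank pairs built once; same value on every input where A terminates.

-- ===== PORT A =====
-- A's while-loop 'while idx >= r1: idx -= r1; r1 -= 1'; the extra 'r1 > 0' guard
-- only totalises the recursion — Python diverges exactly where it fires with idx ≥ r1.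
-- r1 is carried as the Nat it always is on terminating runs (12,11,…); at r1 = 0 the
-- Python loop either exits (idx < 0) or diverges, so returning (idx, 0) there is a pure
-- totalisation — it is only reached outside Pre_.
def pyLoopA (idx : Int) : Nat → Int × Int
  | 0 => (idx, 0)
  | n + 1 => if idx ≥ ((n : Int) + 1) then pyLoopA (idx - ((n : Int) + 1)) n else (idx, (n : Int) + 1)

def class_decompose_py (cls_idx : Int) : Int × Int × Bool :=
  if cls_idx < 13 then
    (12 - cls_idx, 12 - cls_idx, false)
  else if cls_idx < 91 then
    let p := pyLoopA (cls_idx - 13) 12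
    (p.2, p.2 - 1 - p.1, true)
  else
    let p := pyLoopA (cls_idx - 91) 12
    (p.2, p.2 - 1 - p.1, false)

-- ===== PORT B =====
-- _PAIRS = [(r1, r2) for r1 in range(12, 0, -1) for r2 in range(r1-1, -1, -1)]
def pvPairsB : List (Int × Int) :=
  (PySem.List.pyRange 12 0 (-1)).flatMap (fun r1 =>
    (PySem.List.pyRange (r1 - 1) (-1) (-1)).map (fun r2 => (r1, r2)))

def class_decompose_py_alt (cls_idx : Int) : Int × Int × Bool :=
  if cls_idx < 13 then
    (12 - cls_idx, 12 - cls_idx, false)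
  else
    let suited := cls_idx < 91
    match PySem.List.pyGet? pvPairsB (if suited then cls_idx - 13 else cls_idx - 91) with
    | some (r1, r2) => (r1, r2, suited)
    | none => (0, 0, suited)   -- Python raises IndexError here; outside Pre_

-- ===== PRECONDITION & SPEC =====
-- A's while-loop never terminates for cls_idx ≥ 169 (r1 goes negative and idx grows), so A returns exactly on cls_idx ≤ 168.
def Pre_class_decompose_py (cls_idx : Int) : Prop := cls_idx ≤ 168
instance (cls_idx : Int) : Decidable (Pre_class_decompose_py cls_idx) := by unfold Pre_class_decompose_py; infer_instance
def pvWitness_class_decompose_py : Int := (100)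

def Spec_class_decompose_py (cls_idx : Int) (out : Int × Int × Bool) : Prop := out = class_decompose_py_alt cls_idx
instance (cls_idx : Int) (out : Int × Int × Bool) : Decidable (Spec_class_decompose_py cls_idx out) := by unfold Spec_class_decompose_py; infer_instance

-- ===== CLAIM (what is proved, stated in full; the proofs are below) =====
def Claim_equal_class_decompose_py : Prop := ∀ (cls_idx : Int), Dom_class_decompose_py cls_idx → Pre_class_decompose_py cls_idx → Spec_class_decompose_py cls_idx (class_decompose_py cls_idx)

-- ===== LEMMAS AND PROOFS =====
-- All 156 non-pair indices checked by kernel evaluation.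
set_option maxRecDepth 4000 in
lemma key_range : ∀ n : Nat, n < 169 → class_decompose_py (n : Int) = class_decompose_py_alt (n : Int) := by decide

-- ===== VERDICT (by name: the statement is the Claim_ definition above) =====
theorem class_decompose_py_spec : Claim_equal_class_decompose_py := by
  intro cls_idx _ hpre
  have hpre' : cls_idx ≤ 168 := hpre
  unfold Spec_class_decompose_py
  by_cases hlt : cls_idx < 0
  · have h13 : cls_idx < 13 := by omega
    simp [class_decompose_py, class_decompose_py_alt, h13]
  · have hnn : 0 ≤ cls_idx := by omega
    have hn : cls_idx = (cls_idx.toNat : Int) := (Int.toNat_of_nonneg hnn).symm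
    have hb : cls_idx.toNat < 169 := by omega
    rw [hn]
    exact key_range cls_idx.toNat hb
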